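-- pv_equiv track=rewrite | github.com/LingeshwarKulal/attack-surface-mapper | src/subdomain/subdomain_enum.py | _categorize_subdomains
-- ===== SOURCE A (Python) =====
-- from typing import List, Dict, Any, Set
--
-- def _categorize_subdomains(subdomains: List[str]) -> Dict[str, List[str]]:
--     """
--     Categorize subdomains by purpose.
--
--     Args:
--         subdomains: List of subdomains
--
--     Returns:
--         Dictionary of categorized subdomains
--     """
--     categories = {
--         'admin': [],
--         'development': [],
--         'api': [],
--         'mail': [],
--         'cdn': [],
--         'vpn': [],
--         'other': []
--     }
--
--     admin_keywords = ['admin', 'panel', 'cpanel', 'whm', 'portal', 'manage']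
--     dev_keywords = ['dev', 'test', 'staging', 'demo', 'qa', 'uat']
--     api_keywords = ['api', 'rest', 'graphql', 'ws', 'service']
--     mail_keywords = ['mail', 'smtp', 'pop', 'imap', 'webmail', 'email']
--     cdn_keywords = ['cdn', 'static', 'assets', 'img', 'images', 'media']
--     vpn_keywords = ['vpn', 'remote', 'citrix', 'rdp']
--
--     for subdomain in subdomains:
--         sub_lower = subdomain.lower()
--
--         if any(keyword in sub_lower for keyword in admin_keywords):
--             categories['admin'].append(subdomain)
--         elif any(keyword in sub_lower for keyword in dev_keywords):
--             categories['development'].append(subdomain)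
--         elif any(keyword in sub_lower for keyword in api_keywords):
--             categories['api'].append(subdomain)
--         elif any(keyword in sub_lower for keyword in mail_keywords):
--             categories['mail'].append(subdomain)
--         elif any(keyword in sub_lower for keyword in cdn_keywords):
--             categories['cdn'].append(subdomain)
--         elif any(keyword in sub_lower for keyword in vpn_keywords):
--             categories['vpn'].append(subdomain)
--         else:
--             categories['other'].append(subdomain)
--
--     # Remove empty categories
--     return {k: v for k, v in categories.items() if v}
-- ===== SOURCE B (Python) =====
-- from typing import List, Dict
--
-- _CATEGORIES = [
--     ('admin', ['admin', 'panel', 'cpanel', 'whm', 'portal', 'manage']),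
--     ('development', ['dev', 'test', 'staging', 'demo', 'qa', 'uat']),
--     ('api', ['api', 'rest', 'graphql', 'ws', 'service']),
--     ('mail', ['mail', 'smtp', 'pop', 'imap', 'webmail', 'email']),
--     ('cdn', ['cdn', 'static', 'assets', 'img', 'images', 'media']),
--     ('vpn', ['vpn', 'remote', 'citrix', 'rdp']),
-- ]
--
-- def _classify(subdomain: str) -> str:
--     sub_lower = subdomain.lower()
--     for name, keywords in _CATEGORIES:
--         if any(keyword in sub_lower for keyword in keywords):
--             return name
--     return 'other'
--
-- def _categorize_subdomains(subdomains: List[str]) -> Dict[str, List[str]]: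
--     labeled = [(_classify(s), s) for s in subdomains]
--     names = [name for name, _ in _CATEGORIES] + ['other']
--     return {name: members
--             for name in names
--             if (members := [s for label, s in labeled if label == name])}
-- ===== Notes on version B (the rewrite author's own statement) =====
-- stated objective: idiomatic
-- what changed: Replaces the unrolled if/elif chain over mutable per-category append lists with a data-driven category table: each subdomain is labelled once by a first-match _classify helper, and one dict comprehension per category collects the members, keeping empty categories out by construction.
import Mathlib
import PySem

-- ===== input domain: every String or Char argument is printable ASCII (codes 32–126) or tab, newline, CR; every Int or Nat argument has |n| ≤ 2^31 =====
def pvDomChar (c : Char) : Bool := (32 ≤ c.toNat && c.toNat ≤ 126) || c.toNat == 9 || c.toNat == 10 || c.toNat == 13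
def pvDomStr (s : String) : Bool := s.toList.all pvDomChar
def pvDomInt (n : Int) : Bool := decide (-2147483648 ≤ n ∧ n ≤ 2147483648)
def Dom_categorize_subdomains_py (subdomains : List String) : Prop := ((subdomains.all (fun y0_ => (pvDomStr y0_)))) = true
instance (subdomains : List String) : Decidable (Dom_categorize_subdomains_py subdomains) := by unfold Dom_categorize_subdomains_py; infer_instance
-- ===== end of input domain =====

-- B replaces A's unrolled if/elif chain over six mutable append-lists by a category
-- table with a first-match classifier and one dict comprehension per category (idiomatic).

-- ===== PORT A =====
-- The Python dict 'categories' has seven FIXED literal keys; it is represented by its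
-- seven value lists (in key insertion order) as a structure.
structure PvCats where
  admin : List String
  dev : List String
  api : List String
  mail : List String
  cdn : List String
  vpn : List String
  other : List String
deriving Repr, DecidableEq

-- the loop body of A's for-loop
def pvStep (c : PvCats) (subdomain : String) : PvCats :=
  let sub_lower := PySem.Str.lower subdomain
  if ["admin", "panel", "cpanel", "whm", "portal", "manage"].any
      (fun keyword => PySem.Str.isIn keyword sub_lower) then
    { c with admin := c.admin ++ [subdomain] }
  else if ["dev", "test", "staging", "demo", "qa", "uat"].any
      (fun keyword => PySem.Str.isIn keyword sub_lower) then
    { c with dev := c.dev ++ [subdomain] }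
  else if ["api", "rest", "graphql", "ws", "service"].any
      (fun keyword => PySem.Str.isIn keyword sub_lower) then
    { c with api := c.api ++ [subdomain] }
  else if ["mail", "smtp", "pop", "imap", "webmail", "email"].any
      (fun keyword => PySem.Str.isIn keyword sub_lower) then
    { c with mail := c.mail ++ [subdomain] }
  else if ["cdn", "static", "assets", "img", "images", "media"].any
      (fun keyword => PySem.Str.isIn keyword sub_lower) then
    { c with cdn := c.cdn ++ [subdomain] }
  else if ["vpn", "remote", "citrix", "rdp"].any
      (fun keyword => PySem.Str.isIn keyword sub_lower) then
    { c with vpn := c.vpn ++ [subdomain] }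
  else
    { c with other := c.other ++ [subdomain] }

def categorize_subdomains_py (subdomains : List String) : List (String × List String) :=
  let categories : PvCats := ⟨[], [], [], [], [], [], []⟩
  let st := subdomains.foldl pvStep categories
  -- {k: v for k, v in categories.items() if v}
  ([("admin", st.admin), ("development", st.dev), ("api", st.api), ("mail", st.mail),
    ("cdn", st.cdn), ("vpn", st.vpn), ("other", st.other)]).filter (fun p => !p.2.isEmpty)

-- ===== PORT B =====
def pvCatTable : List (String × List String) :=
  [("admin", ["admin", "panel", "cpanel", "whm", "portal", "manage"]),
   ("development", ["dev", "test", "staging", "demo", "qa", "uat"]),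
   ("api", ["api", "rest", "graphql", "ws", "service"]),
   ("mail", ["mail", "smtp", "pop", "imap", "webmail", "email"]),
   ("cdn", ["cdn", "static", "assets", "img", "images", "media"]),
   ("vpn", ["vpn", "remote", "citrix", "rdp"])]

def pvClassifyGo (sub_lower : String) : List (String × List String) → String
  | [] => "other"
  | (name, keywords) :: rest =>
    if keywords.any (fun keyword => PySem.Str.isIn keyword sub_lower) then name
    else pvClassifyGo sub_lower rest

def pvClassify (subdomain : String) : String :=
  pvClassifyGo (PySem.Str.lower subdomain) pvCatTable

def categorize_subdomains_py_alt (subdomains : List String) : List (String × List String) :=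
  let labeled := subdomains.map (fun s => (pvClassify s, s))
  let names := pvCatTable.map Prod.fst ++ ["other"]
  names.filterMap (fun name =>
    let members := labeled.filterMap (fun p => if p.1 == name then some p.2 else none)
    if members.isEmpty then none else some (name, members))

-- ===== PRECONDITION & SPEC =====
def Spec_categorize_subdomains_py (subdomains : List String) (out : List (String × List String)) : Prop := out = categorize_subdomains_py_alt subdomains
instance (subdomains : List String) (out : List (String × List String)) : Decidable (Spec_categorize_subdomains_py subdomains out) := by unfold Spec_categorize_subdomains_py; infer_instance

-- ===== CLAIM (what is proved, stated in full; the proofs are below) =====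
def Claim_equal_categorize_subdomains_py : Prop := ∀ (subdomains : List String), Dom_categorize_subdomains_py subdomains → Spec_categorize_subdomains_py subdomains (categorize_subdomains_py subdomains)

-- ===== LEMMAS AND PROOFS =====

-- B's labelled one-pass list, filtered per name, is a plain filter of the input.
set_option maxHeartbeats 1000000 in
theorem pv_members_eq (l : List String) (name : String) :
    (l.map (fun s => (pvClassify s, s))).filterMap
        (fun p => if p.1 == name then some p.2 else none) =
      l.filter (fun s => pvClassify s == name) := by
  induction l with
  | nil => simp
  | cons s t ih =>
    simp only [List.map_cons, List.filterMap_cons, List.filter_cons]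
    by_cases h : (pvClassify s == name) = true <;>
      simp only [h, ih, if_true, if_false, Bool.not_eq_true, ite_true, ite_false,
        Bool.false_eq_true]

-- A's loop body, per category, appends s exactly when B's classifier sends s there.
set_option maxHeartbeats 1000000 in
theorem pvStep_eq (c : PvCats) (s : String) :
    pvStep c s =
      ⟨c.admin ++ (if pvClassify s == "admin" then [s] else []),
       c.dev ++ (if pvClassify s == "development" then [s] else []),
       c.api ++ (if pvClassify s == "api" then [s] else []),
       c.mail ++ (if pvClassify s == "mail" then [s] else []),
       c.cdn ++ (if pvClassify s == "cdn" then [s] else []),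
       c.vpn ++ (if pvClassify s == "vpn" then [s] else []),
       c.other ++ (if pvClassify s == "other" then [s] else [])⟩ := by
  by_cases h1 : (["admin", "panel", "cpanel", "whm", "portal", "manage"].any
      (fun keyword => PySem.Str.isIn keyword (PySem.Str.lower s))) = true <;>
  by_cases h2 : (["dev", "test", "staging", "demo", "qa", "uat"].any
      (fun keyword => PySem.Str.isIn keyword (PySem.Str.lower s))) = true <;>
  by_cases h3 : (["api", "rest", "graphql", "ws", "service"].any
      (fun keyword => PySem.Str.isIn keyword (PySem.Str.lower s))) = true <;>
  by_cases h4 : (["mail", "smtp", "pop", "imap", "webmail", "email"].any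
      (fun keyword => PySem.Str.isIn keyword (PySem.Str.lower s))) = true <;>
  by_cases h5 : (["cdn", "static", "assets", "img", "images", "media"].any
      (fun keyword => PySem.Str.isIn keyword (PySem.Str.lower s))) = true <;>
  by_cases h6 : (["vpn", "remote", "citrix", "rdp"].any
      (fun keyword => PySem.Str.isIn keyword (PySem.Str.lower s))) = true <;>
  simp only [pvStep, pvClassify, pvCatTable, pvClassifyGo, h1, h2, h3, h4, h5, h6] <;>
  simp [h1, h2, h3, h4, h5, h6]

-- A's fold accumulates, per category, exactly the subdomains B's classifier sends there.
theorem pv_fold_eq (l : List String) (c : PvCats) :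
    l.foldl pvStep c =
    ⟨c.admin ++ l.filter (fun s => pvClassify s == "admin"),
     c.dev ++ l.filter (fun s => pvClassify s == "development"),
     c.api ++ l.filter (fun s => pvClassify s == "api"),
     c.mail ++ l.filter (fun s => pvClassify s == "mail"),
     c.cdn ++ l.filter (fun s => pvClassify s == "cdn"),
     c.vpn ++ l.filter (fun s => pvClassify s == "vpn"),
     c.other ++ l.filter (fun s => pvClassify s == "other")⟩ := by
  induction l generalizing c with
  | nil => simp
  | cons s t ih =>
    rw [List.foldl_cons, pvStep_eq, ih]
    simp [List.filter_cons]
    split_ifs <;> simp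

-- ===== VERDICT (by name: the statement is the Claim_ definition above) =====
theorem categorize_subdomains_py_spec : Claim_equal_categorize_subdomains_py := by
  intro subdomains _
  show _ = _
  simp only [categorize_subdomains_py, categorize_subdomains_py_alt, pv_fold_eq,
    pv_members_eq, List.nil_append]
  simp only [pvCatTable, List.map_cons, List.map_nil, List.nil_append, List.cons_append,
    List.filterMap_cons, List.filterMap_nil, List.filter_cons, List.filter_nil]
  generalize subdomains.filter (fun s => pvClassify s == "admin") = l1
  generalize subdomains.filter (fun s => pvClassify s == "development") = l2
  generalize subdomains.filter (fun s => pvClassify s == "api") = l3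
  generalize subdomains.filter (fun s => pvClassify s == "mail") = l4
  generalize subdomains.filter (fun s => pvClassify s == "cdn") = l5
  generalize subdomains.filter (fun s => pvClassify s == "vpn") = l6
  generalize subdomains.filter (fun s => pvClassify s == "other") = l7
  cases l1 <;> cases l2 <;> cases l3 <;> cases l4 <;> cases l5 <;> cases l6 <;> cases l7 <;>
    simp
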